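-- pv_equiv track=rewrite | github.com/CodingLiOOT/Warchess-Defense-Env | tools/route.py | detect_invalid_path
-- ===== SOURCE A (Python) =====
-- def _move(x, y, direction):
--     if direction == 1:
--         y -= 1  # 上
--     elif direction == 2:
--         x += 1  # 右上
--         y -= 1
--     elif direction == 3:
--         x += 1  # 右
--     elif direction == 4:
--         x += 1  # 右下
--         y += 1
--     elif direction == 5:
--         y += 1  # 下
--     elif direction == 6:
--         x -= 1  # 左下
--         y += 1
--     elif direction == 7:
--         x -= 1  # 左
--     elif direction == 8:
--         x -= 1
--         y -= 1  # 左上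
--     return (x, y)
--
-- def detect_invalid_path(path, start, N=10, M=4):
--     current_pos = start
--     visited_positions = []
--     visited_positions.append(current_pos)
--
--     for i, direction in enumerate(path):
--         next_pos = _move(current_pos[0], current_pos[1], direction)
--
--         # 判断绕圈逻辑：与N步之前的位置比较
--         if i >= N:
--             if manhattan_distance(next_pos, visited_positions[i - N]) < M:
--                 return True
--
--         visited_positions.append(next_pos)
--         current_pos = next_pos
--
--     return False
--
-- def manhattan_distance(pos1, pos2):
--     return abs(pos1[0] - pos2[0]) + abs(pos1[1] - pos2[1])
-- ===== SOURCE B (Python) =====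
-- def detect_invalid_path(path, start, N=10, M=4):
--     # Sliding window of displacement vectors: never builds positions; the Manhattan
--     # distance to the position N+1 steps back telescopes to |sum dx| + |sum dy|
--     # over the window of the last N+1 moves.
--     DX = {1: 0, 2: 1, 3: 1, 4: 1, 5: 0, 6: -1, 7: -1, 8: -1}
--     DY = {1: -1, 2: -1, 3: 0, 4: 1, 5: 1, 6: 1, 7: 0, 8: -1}
--     window = []
--     sx = sy = 0
--     for d in path:
--         dx = DX.get(d, 0)
--         dy = DY.get(d, 0)
--         window.append((dx, dy))
--         sx += dx
--         sy += dy
--         if len(window) > N + 1: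
--             ox, oy = window.pop(0)
--             sx -= ox
--             sy -= oy
--         if len(window) == N + 1 and abs(sx) + abs(sy) < M:
--             return True
--     return False
-- ===== Notes on version B (the rewrite author's own statement) =====
-- stated objective: alternative
-- what changed: B never simulates positions: it maps each direction to a displacement vector via lookup tables and slides a window of the last N+1 displacement vectors with a running component sum, testing |sum dx|+|sum dy| < M, which telescopes to A's Manhattan distance to the position N+1 steps back.
import Mathlib
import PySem

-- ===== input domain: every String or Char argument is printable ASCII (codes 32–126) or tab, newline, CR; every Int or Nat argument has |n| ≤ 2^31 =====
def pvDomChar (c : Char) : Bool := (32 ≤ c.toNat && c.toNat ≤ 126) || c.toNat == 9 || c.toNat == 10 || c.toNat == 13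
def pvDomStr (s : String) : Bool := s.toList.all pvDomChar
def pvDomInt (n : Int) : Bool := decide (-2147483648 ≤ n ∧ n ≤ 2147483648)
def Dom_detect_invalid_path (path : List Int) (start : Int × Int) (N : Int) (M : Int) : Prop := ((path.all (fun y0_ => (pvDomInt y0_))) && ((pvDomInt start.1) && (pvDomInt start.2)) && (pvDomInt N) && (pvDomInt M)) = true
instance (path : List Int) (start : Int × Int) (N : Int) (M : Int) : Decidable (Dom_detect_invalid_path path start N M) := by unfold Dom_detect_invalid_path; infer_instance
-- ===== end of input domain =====

-- B replaces A's position simulation by a sliding window of per-move displacement vectors with a running component sum (alternative algorithm, same cost); equivalence of the window sum with A's Manhattan test is by telescoping.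


-- ===== PORT A =====
def pvMove (x y direction : Int) : Int × Int :=
  if direction = 1 then (x, y - 1)
  else if direction = 2 then (x + 1, y - 1)
  else if direction = 3 then (x + 1, y)
  else if direction = 4 then (x + 1, y + 1)
  else if direction = 5 then (x, y + 1)
  else if direction = 6 then (x - 1, y + 1)
  else if direction = 7 then (x - 1, y)
  else if direction = 8 then (x - 1, y - 1)
  else (x, y)

def pvManhattan (p q : Int × Int) : Int := |p.1 - q.1| + |p.2 - q.2|

-- the for-loop of A: state = (remaining path, enumerate index i, current_pos, visited_positions)
def pvDetectGo (N M : Int) : List Int → Int → (Int × Int) → List (Int × Int) → Bool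
  | [], _, _, _ => false
  | d :: rest, i, cur, visited =>
    let next := pvMove cur.1 cur.2 d
    if N ≤ i then
      match PySem.List.pyGet? visited (i - N) with
      | none => false   -- Python raises IndexError here; excluded by Pre_
      | some p =>
        if pvManhattan next p < M then true
        else pvDetectGo N M rest (i + 1) next (visited ++ [next])
    else pvDetectGo N M rest (i + 1) next (visited ++ [next])

def detect_invalid_path (path : List Int) (start : Int × Int) (N : Int) (M : Int) : Bool :=
  pvDetectGo N M path 0 start [start]

-- ===== PORT B =====
-- the dict literals DX, DY of Source B
def pvDX : PySem.Dict Int Int := PySem.Dict.ofList [(1,0),(2,1),(3,1),(4,1),(5,0),(6,-1),(7,-1),(8,-1)]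
def pvDY : PySem.Dict Int Int := PySem.Dict.ofList [(1,-1),(2,-1),(3,0),(4,1),(5,1),(6,1),(7,0),(8,-1)]

-- the for-loop of Source B: state = (remaining path, window of displacement vectors, sx, sy)
def pvScanGo (N M : Int) : List Int → List (Int × Int) → Int → Int → Bool
  | [], _, _, _ => false
  | d :: rest, window, sx, sy =>
    let dx := pvDX.getD d 0
    let dy := pvDY.getD d 0
    let w1 := window ++ [(dx, dy)]
    let sx1 := sx + dx
    let sy1 := sy + dy
    -- window.pop(0): w1 was just appended to, so it is nonempty and pop(0) takes its head (exact)
    let st :=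
      if N + 1 < (w1.length : Int) then
        match w1 with
        | [] => ([], sx1, sy1)   -- unreachable
        | o :: w2 => (w2, sx1 - o.1, sy1 - o.2)
      else (w1, sx1, sy1)
    if ((st.1.length : Int) = N + 1 ∧ |st.2.1| + |st.2.2| < M) then true
    else pvScanGo N M rest st.1 st.2.1 st.2.2

def detect_invalid_path_alt (path : List Int) (start : Int × Int) (N : Int) (M : Int) : Bool :=
  pvScanGo N M path [] 0 0

-- ===== PRECONDITION & SPEC =====
-- Pre_ excludes exactly the inputs on which A raises: a nonempty path with negative N makes
-- visited_positions[i - N] an out-of-range index at the first iteration (IndexError).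
def Pre_detect_invalid_path (path : List Int) (start : Int × Int) (N : Int) (M : Int) : Prop := 0 ≤ N ∨ path = []
instance (path : List Int) (start : Int × Int) (N : Int) (M : Int) : Decidable (Pre_detect_invalid_path path start N M) := by unfold Pre_detect_invalid_path; infer_instance
def pvWitness_detect_invalid_path : List Int × (Int × Int) × Int × Int := ([1, 3, 5, 7], (0, 0), 2, 4)

def Spec_detect_invalid_path (path : List Int) (start : Int × Int) (N : Int) (M : Int) (out : Bool) : Prop := out = detect_invalid_path_alt path start N M
instance (path : List Int) (start : Int × Int) (N : Int) (M : Int) (out : Bool) : Decidable (Spec_detect_invalid_path path start N M out) := by unfold Spec_detect_invalid_path; infer_instance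

-- ===== CLAIM (what is proved, stated in full; the proofs are below) =====
def Claim_equal_detect_invalid_path : Prop := ∀ (path : List Int) (start : Int × Int) (N : Int) (M : Int), Dom_detect_invalid_path path start N M → Pre_detect_invalid_path path start N M → Spec_detect_invalid_path path start N M (detect_invalid_path path start N M)

-- ===== LEMMAS AND PROOFS =====

-- positions reached after each successive move, starting from (but excluding) cur
def pvPosFrom (cur : Int × Int) : List Int → List (Int × Int)
  | [] => []
  | d :: rest =>
    let next := pvMove cur.1 cur.2 d
    next :: pvPosFrom next rest

-- cumulative positions obtained by applying the displacement vectors vs one by one from q (q excluded)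
def pvCumul (q : Int × Int) : List (Int × Int) → List (Int × Int)
  | [] => []
  | v :: vs => (q.1 + v.1, q.2 + v.2) :: pvCumul (q.1 + v.1, q.2 + v.2) vs

def pvChain (q : Int × Int) (vs : List (Int × Int)) : List (Int × Int) := q :: pvCumul q vs

def pvEnd (q : Int × Int) (vs : List (Int × Int)) : Int × Int :=
  (q.1 + (vs.map Prod.fst).sum, q.2 + (vs.map Prod.snd).sum)

lemma pvGoA (N M : Int) (hN : 0 ≤ N) (path : List Int) :
    ∀ (i : Nat) (cur : Int × Int) (visited : List (Int × Int)),
    visited.length = i + 1 →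
    pvDetectGo N M path (i : Int) cur visited =
      (((pvPosFrom cur path).drop (N - i).toNat).zip
        ((visited ++ pvPosFrom cur path).drop ((i : Int) - N).toNat)).any
        (fun pq => pvManhattan pq.1 pq.2 < M) := by
  induction path with
  | nil => intro i cur visited _; simp [pvDetectGo, pvPosFrom]
  | cons d rest ih =>
    intro i cur visited hlen
    set next := pvMove cur.1 cur.2 d with hnext
    have hpos : pvPosFrom cur (d :: rest) = next :: pvPosFrom next rest := by
      simp [pvPosFrom, hnext]
    by_cases h : N ≤ (i : Int)
    · -- comparison step
      have hk0 : (0:Int) ≤ (i : Int) - N := by omega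
      have hklt : ((i : Int) - N).toNat < visited.length := by omega
      have hget : PySem.List.pyGet? visited ((i : Int) - N)
          = some visited[((i : Int) - N).toNat] := by
        rw [PySem.List.pyGet?_of_nonneg visited hk0, List.getElem?_eq_getElem hklt]
      have hkltL : ((i : Int) - N).toNat < (visited ++ next :: pvPosFrom next rest).length := by
        simp; omega
      have hdropL : (visited ++ next :: pvPosFrom next rest).drop (((i : Int) - N).toNat)
          = (visited ++ next :: pvPosFrom next rest)[((i : Int) - N).toNat]
            :: (visited ++ next :: pvPosFrom next rest).drop (((i : Int) - N).toNat + 1) :=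
        List.drop_eq_getElem_cons hkltL
      have hgetL : (visited ++ next :: pvPosFrom next rest)[((i : Int) - N).toNat]'hkltL
          = visited[((i : Int) - N).toNat] := List.getElem_append_left hklt
      have hNi : (N - (i : Int)).toNat = 0 := by omega
      rw [hpos]
      show pvDetectGo N M (d :: rest) (i : Int) cur visited = _
      rw [hNi, List.drop_zero, hdropL, List.zip_cons_cons, List.any_cons]
      unfold pvDetectGo
      rw [if_pos h, hget]
      simp only [hgetL]
      by_cases hp : pvManhattan next visited[((i : Int) - N).toNat] < M
      · have hd : decide (pvManhattan next visited[((i : Int) - N).toNat] < M) = true :=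
          decide_eq_true hp
        simp only [hnext] at hd
        rw [hd]
        simp
        exact Or.inl hp
      · have hih := ih (i + 1) next (visited ++ [next]) (by simp [hlen])
        have e1 : (N - ((i : Nat) + 1 : Nat)).toNat = 0 := by push_cast; omega
        have e2 : (((i : Nat) + 1 : Nat) : Int) - N = ((i : Int) - N) + 1 := by push_cast; omega
        have e3 : (((i : Int) - N) + 1).toNat = ((i : Int) - N).toNat + 1 := by omega
        rw [e1, e2, e3, List.drop_zero] at hih
        have e4 : visited ++ [next] ++ pvPosFrom next rest = visited ++ next :: pvPosFrom next rest := by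
          simp
        rw [e4] at hih
        have hcast : ((i : Int) + 1) = (((i : Nat) + 1 : Nat) : Int) := by push_cast; ring
        simp only [hnext] at hih hp ⊢
        rw [hcast, hih, if_neg hp, decide_eq_false hp, Bool.false_or]
    · -- no comparison yet: i < N
      have hgt : (0:Int) < N - (i : Int) := by omega
      rw [hpos]
      show pvDetectGo N M (d :: rest) (i : Int) cur visited = _
      unfold pvDetectGo
      rw [if_neg h]
      have hih := ih (i + 1) next (visited ++ [next]) (by simp [hlen])
      have e1 : ((((i : Nat) + 1 : Nat)) : Int) - N = ((i : Int) + 1) - N := by push_cast; ring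
      have e2 : (((i : Int) + 1) - N).toNat = 0 := by omega
      have e3 : ((i : Int) - N).toNat = 0 := by omega
      have e4 : (N - (((i : Nat) + 1 : Nat) : Int)).toNat = (N - (i : Int)).toNat - 1 := by push_cast; omega
      have e5 : visited ++ [next] ++ pvPosFrom next rest = visited ++ next :: pvPosFrom next rest := by simp
      rw [e1, e2, e4, e5, List.drop_zero] at hih
      have hm : (N - (i : Int)).toNat = ((N - (i : Int)).toNat - 1) + 1 := by omega
      have hdrop1 : (next :: pvPosFrom next rest).drop ((N - (i : Int)).toNat)
          = (pvPosFrom next rest).drop ((N - (i : Int)).toNat - 1) := by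
        conv_lhs => rw [hm]
        exact List.drop_succ_cons ..
      have : ((i : Int) + 1) = (((i : Nat) + 1 : Nat) : Int) := by push_cast; ring
      rw [this, hih, e3, List.drop_zero, hdrop1]

lemma pvDelta (d x y : Int) : pvMove x y d = (x + pvDX.getD d 0, y + pvDY.getD d 0) := by
  have hx : pvDX.items = [(1,0),(2,1),(3,1),(4,1),(5,0),(6,-1),(7,-1),(8,-1)] := by decide
  have hy : pvDY.items = [(1,-1),(2,-1),(3,0),(4,1),(5,1),(6,1),(7,0),(8,-1)] := by decide
  by_cases h1 : d = 1
  · subst h1; simp [pvMove, PySem.Dict.getD, PySem.Dict.get?, hx, hy, Prod.ext_iff] <;> omega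
  by_cases h2 : d = 2
  · subst h2; simp [pvMove, PySem.Dict.getD, PySem.Dict.get?, hx, hy, Prod.ext_iff, h1] <;> omega
  by_cases h3 : d = 3
  · subst h3; simp [pvMove, PySem.Dict.getD, PySem.Dict.get?, hx, hy, Prod.ext_iff, h1, h2] <;> omega
  by_cases h4 : d = 4
  · subst h4; simp [pvMove, PySem.Dict.getD, PySem.Dict.get?, hx, hy, Prod.ext_iff, h1, h2, h3] <;> omega
  by_cases h5 : d = 5
  · subst h5; simp [pvMove, PySem.Dict.getD, PySem.Dict.get?, hx, hy, Prod.ext_iff, h1, h2, h3, h4] <;> omega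
  by_cases h6 : d = 6
  · subst h6; simp [pvMove, PySem.Dict.getD, PySem.Dict.get?, hx, hy, Prod.ext_iff, h1, h2, h3, h4, h5] <;> omega
  by_cases h7 : d = 7
  · subst h7; simp [pvMove, PySem.Dict.getD, PySem.Dict.get?, hx, hy, Prod.ext_iff, h1, h2, h3, h4, h5, h6] <;> omega
  by_cases h8 : d = 8
  · subst h8; simp [pvMove, PySem.Dict.getD, PySem.Dict.get?, hx, hy, Prod.ext_iff, h1, h2, h3, h4, h5, h6, h7] <;> omega
  · have g : ∀ k : Int, ¬ d = k → ((k == d) = false) :=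
      fun k h => beq_eq_false_iff_ne.mpr (fun e => h e.symm)
    simp [pvMove, PySem.Dict.getD, PySem.Dict.get?, hx, hy, List.find?,
      g 1 h1, g 2 h2, g 3 h3, g 4 h4, g 5 h5, g 6 h6, g 7 h7, g 8 h8,
      h1, h2, h3, h4, h5, h6, h7, h8, Prod.ext_iff]

lemma pvEnd_append (q : Int × Int) (vs : List (Int × Int)) (v : Int × Int) :
    pvEnd q (vs ++ [v]) = ((pvEnd q vs).1 + v.1, (pvEnd q vs).2 + v.2) := by
  simp [pvEnd, Prod.ext_iff]; constructor <;> ring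

lemma pvCumul_append (q : Int × Int) (vs : List (Int × Int)) (v : Int × Int) :
    pvCumul q (vs ++ [v]) = pvCumul q vs ++ [pvEnd q (vs ++ [v])] := by
  induction vs generalizing q with
  | nil => simp [pvCumul, pvEnd]
  | cons w ws ih =>
    simp only [List.cons_append, pvCumul, ih, List.cons_append, List.append_cancel_left_eq,
      List.cons.injEq, and_true]
    simp [pvEnd, Prod.ext_iff]; constructor <;> ring

lemma pvScanGo_cons_pop (N M d : Int) (rest : List Int) (o : Int × Int) (vs' : List (Int × Int))
    (sx sy : Int)
    (hpop : N + 1 < (((o :: vs') ++ [(pvDX.getD d 0, pvDY.getD d 0)]).length : Int)) :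
    pvScanGo N M (d :: rest) (o :: vs') sx sy =
      if ((((vs' ++ [(pvDX.getD d 0, pvDY.getD d 0)]).length : Nat) : Int) = N + 1 ∧
          |sx + pvDX.getD d 0 - o.1| + |sy + pvDY.getD d 0 - o.2| < M) then true
      else pvScanGo N M rest (vs' ++ [(pvDX.getD d 0, pvDY.getD d 0)])
        (sx + pvDX.getD d 0 - o.1) (sy + pvDY.getD d 0 - o.2) := by
  simp only [pvScanGo, List.cons_append] at hpop ⊢
  rw [if_pos hpop]

lemma pvScanGo_cons_nopop (N M d : Int) (rest : List Int) (vs : List (Int × Int))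
    (sx sy : Int)
    (hnopop : ¬ (N + 1 < ((vs ++ [(pvDX.getD d 0, pvDY.getD d 0)]).length : Int))) :
    pvScanGo N M (d :: rest) vs sx sy =
      if ((((vs ++ [(pvDX.getD d 0, pvDY.getD d 0)]).length : Nat) : Int) = N + 1 ∧
          |sx + pvDX.getD d 0| + |sy + pvDY.getD d 0| < M) then true
      else pvScanGo N M rest (vs ++ [(pvDX.getD d 0, pvDY.getD d 0)])
        (sx + pvDX.getD d 0) (sy + pvDY.getD d 0) := by
  simp only [pvScanGo] at hnopop ⊢
  rw [if_neg hnopop]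

lemma pvGoB (N M : Int) (hN : 0 ≤ N) (rest : List Int) :
    ∀ (vs : List (Int × Int)) (q : Int × Int),
    ((vs.length : Int) ≤ N + 1) →
    pvScanGo N M rest vs ((vs.map Prod.fst).sum) ((vs.map Prod.snd).sum)
     = (((pvPosFrom (pvEnd q vs) rest).drop (N - (vs.length : Int)).toNat).zip
         ((pvChain q vs ++ pvPosFrom (pvEnd q vs) rest).drop
           (if (vs.length : Int) = N + 1 then 1 else 0))).any
         (fun pq => pvManhattan pq.1 pq.2 < M) := by
  induction rest with
  | nil => intro vs q _; simp [pvScanGo, pvPosFrom]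
  | cons d rest ih =>
    intro vs q hlen
    have hmove : pvMove (pvEnd q vs).1 (pvEnd q vs).2 d
        = pvEnd q (vs ++ [(pvDX.getD d 0, pvDY.getD d 0)]) := by
      rw [pvDelta d (pvEnd q vs).1 (pvEnd q vs).2, pvEnd_append]
    have hpos : pvPosFrom (pvEnd q vs) (d :: rest)
        = pvEnd q (vs ++ [(pvDX.getD d 0, pvDY.getD d 0)])
          :: pvPosFrom (pvEnd q (vs ++ [(pvDX.getD d 0, pvDY.getD d 0)])) rest := by
      simp [pvPosFrom, hmove]
    by_cases hfull : (vs.length : Int) = N + 1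
    · -- window already full: pop the head, window length stays N + 1
      have hvs : vs ≠ [] := by intro h; subst h; simp at hfull; omega
      obtain ⟨o, vs', rfl⟩ := List.exists_cons_of_ne_nil hvs
      have hpop : N + 1 < (((o :: vs') ++ [(pvDX.getD d 0, pvDY.getD d 0)]).length : Int) := by
        simp only [List.length_append, List.length_cons, List.length_nil]
        simp only [List.length_cons] at hfull
        push_cast at hfull ⊢; omega
      rw [pvScanGo_cons_pop N M d rest o vs' _ _ hpop]
      have hs1 : (List.map Prod.fst (o :: vs')).sum + pvDX.getD d 0 - o.1
          = ((vs' ++ [(pvDX.getD d 0, pvDY.getD d 0)]).map Prod.fst).sum := by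
        simp; ring
      have hs2 : (List.map Prod.snd (o :: vs')).sum + pvDY.getD d 0 - o.2
          = ((vs' ++ [(pvDX.getD d 0, pvDY.getD d 0)]).map Prod.snd).sum := by
        simp; ring
      rw [hs1, hs2]
      have hlen2 : (((vs' ++ [(pvDX.getD d 0, pvDY.getD d 0)]).length : Nat) : Int) = N + 1 := by
        simp only [List.length_append, List.length_cons, List.length_nil]
        simp only [List.length_cons] at hfull
        push_cast at hfull ⊢; omega
      have hend2 : pvEnd (q.1 + o.1, q.2 + o.2) (vs' ++ [(pvDX.getD d 0, pvDY.getD d 0)])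
          = pvEnd q ((o :: vs') ++ [(pvDX.getD d 0, pvDY.getD d 0)]) := by
        simp only [pvEnd, List.map_append, List.map_cons, List.sum_append,
          List.sum_cons, List.map_nil, List.sum_nil, Prod.ext_iff]
        constructor <;> ring
      have hsum1 : (pvEnd q ((o :: vs') ++ [(pvDX.getD d 0, pvDY.getD d 0)])).1
            - (q.1 + o.1) = ((vs' ++ [(pvDX.getD d 0, pvDY.getD d 0)]).map Prod.fst).sum := by
        rw [← hend2]; simp [pvEnd]
      have hsum2 : (pvEnd q ((o :: vs') ++ [(pvDX.getD d 0, pvDY.getD d 0)])).2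
            - (q.2 + o.2) = ((vs' ++ [(pvDX.getD d 0, pvDY.getD d 0)]).map Prod.snd).sum := by
        rw [← hend2]; simp [pvEnd]
      -- RHS shape
      rw [hpos, if_pos hfull]
      have hd1 : (N - ((o :: vs').length : Int)).toNat = 0 := by
        simp only [List.length_cons] at hfull ⊢; push_cast at hfull ⊢; omega
      rw [hd1, List.drop_zero]
      have hcum : pvCumul q (o :: vs') = (q.1 + o.1, q.2 + o.2) :: pvCumul (q.1 + o.1, q.2 + o.2) vs' := by
        simp [pvCumul]
      simp only [pvChain, hcum, List.cons_append, List.drop_succ_cons, List.drop_zero,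
        List.zip_cons_cons, List.any_cons]
      have hmanEq : pvManhattan (pvEnd q ((o :: vs') ++ [(pvDX.getD d 0, pvDY.getD d 0)]))
            (q.1 + o.1, q.2 + o.2)
          = |((vs' ++ [(pvDX.getD d 0, pvDY.getD d 0)]).map Prod.fst).sum|
            + |((vs' ++ [(pvDX.getD d 0, pvDY.getD d 0)]).map Prod.snd).sum| := by
        rw [pvManhattan, ← hsum1, ← hsum2]
      by_cases hp : |((vs' ++ [(pvDX.getD d 0, pvDY.getD d 0)]).map Prod.fst).sum|
          + |((vs' ++ [(pvDX.getD d 0, pvDY.getD d 0)]).map Prod.snd).sum| < M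
      · rw [if_pos ⟨hlen2, hp⟩]
        rw [← hmanEq] at hp
        simp only [List.cons_append] at hp
        simp [hp]
      · rw [if_neg (by intro hc; exact hp hc.2)]
        have hih := ih (vs' ++ [(pvDX.getD d 0, pvDY.getD d 0)]) (q.1 + o.1, q.2 + o.2)
          (le_of_eq hlen2)
        rw [hend2, if_pos hlen2] at hih
        have hd2 : (N - (((vs' ++ [(pvDX.getD d 0, pvDY.getD d 0)]).length : Nat) : Int)).toNat = 0 := by
          omega
        rw [hd2, List.drop_zero] at hih
        simp only [pvChain, List.cons_append, List.drop_succ_cons, List.drop_zero] at hih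
        rw [hih, pvCumul_append, hend2]
        rw [← hmanEq] at hp
        simp only [List.cons_append] at hp
        simp only [List.any_cons, decide_eq_true_eq, hp, decide_false, Bool.false_or,
          List.append_assoc, List.cons_append, List.nil_append]
    · -- window not yet full: no pop
      have hnopop : ¬ (N + 1 < ((vs ++ [(pvDX.getD d 0, pvDY.getD d 0)]).length : Int)) := by
        simp only [List.length_append, List.length_cons, List.length_nil]
        push_cast; push_cast at hlen hfull; omega
      rw [pvScanGo_cons_nopop N M d rest vs _ _ hnopop]
      have hs1 : (List.map Prod.fst vs).sum + pvDX.getD d 0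
          = ((vs ++ [(pvDX.getD d 0, pvDY.getD d 0)]).map Prod.fst).sum := by simp
      have hs2 : (List.map Prod.snd vs).sum + pvDY.getD d 0
          = ((vs ++ [(pvDX.getD d 0, pvDY.getD d 0)]).map Prod.snd).sum := by simp
      rw [hs1, hs2]
      have hsum1 : (pvEnd q (vs ++ [(pvDX.getD d 0, pvDY.getD d 0)])).1 - q.1
          = ((vs ++ [(pvDX.getD d 0, pvDY.getD d 0)]).map Prod.fst).sum := by simp [pvEnd]
      have hsum2 : (pvEnd q (vs ++ [(pvDX.getD d 0, pvDY.getD d 0)])).2 - q.2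
          = ((vs ++ [(pvDX.getD d 0, pvDY.getD d 0)]).map Prod.snd).sum := by simp [pvEnd]
      have hih := ih (vs ++ [(pvDX.getD d 0, pvDY.getD d 0)]) q
        (by simp only [List.length_append, List.length_cons, List.length_nil]
            push_cast; push_cast at hlen hfull; omega)
      rw [hpos, if_neg hfull]
      by_cases hN1 : (((vs ++ [(pvDX.getD d 0, pvDY.getD d 0)]).length : Nat) : Int) = N + 1
      · -- the window becomes full at this step: first comparison is against q itself
        have hd0 : (N - (vs.length : Int)).toNat = 0 := by
          simp only [List.length_append, List.length_cons, List.length_nil] at hN1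
          push_cast at hN1; omega
        rw [hd0, List.drop_zero]
        simp only [pvChain, List.cons_append, List.drop_zero, List.zip_cons_cons, List.any_cons]
        have hmanEq : pvManhattan (pvEnd q (vs ++ [(pvDX.getD d 0, pvDY.getD d 0)])) q
            = |((vs ++ [(pvDX.getD d 0, pvDY.getD d 0)]).map Prod.fst).sum|
              + |((vs ++ [(pvDX.getD d 0, pvDY.getD d 0)]).map Prod.snd).sum| := by
          rw [pvManhattan, ← hsum1, ← hsum2]
        by_cases hp : |((vs ++ [(pvDX.getD d 0, pvDY.getD d 0)]).map Prod.fst).sum|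
            + |((vs ++ [(pvDX.getD d 0, pvDY.getD d 0)]).map Prod.snd).sum| < M
        · rw [if_pos ⟨hN1, hp⟩]
          rw [← hmanEq] at hp
          simp [hp]
        · rw [if_neg (by intro hc; exact hp hc.2), hih, if_pos hN1]
          have hd2 : (N - (((vs ++ [(pvDX.getD d 0, pvDY.getD d 0)]).length : Nat) : Int)).toNat = 0 := by
            omega
          rw [hd2, List.drop_zero]
          simp only [pvChain, List.cons_append, List.drop_succ_cons, List.drop_zero]
          rw [pvCumul_append]
          rw [← hmanEq] at hp
          simp only [List.any_cons, decide_eq_true_eq, hp, decide_false, Bool.false_or,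
            List.append_assoc, List.cons_append, List.nil_append]
      · -- still not full after this step
        rw [if_neg (by intro hc; exact hN1 hc.1), hih, if_neg hN1]
        have hdd : (N - (vs.length : Int)).toNat
            = ((N - (((vs ++ [(pvDX.getD d 0, pvDY.getD d 0)]).length : Nat) : Int)).toNat) + 1 := by
          simp only [List.length_append, List.length_cons, List.length_nil] at hN1 ⊢
          push_cast at hN1 hlen hfull ⊢; omega
        rw [hdd, List.drop_succ_cons]
        congr 1
        simp only [pvChain, pvCumul_append, List.drop_zero, List.cons_append,
          List.append_assoc, List.nil_append]

-- ===== VERDICT (by name: the statements are the Claim_ definitions above) =====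
theorem detect_invalid_path_spec : Claim_equal_detect_invalid_path := by
  intro path start N M _ hPre
  unfold Spec_detect_invalid_path
  by_cases hN : 0 ≤ N
  · unfold detect_invalid_path detect_invalid_path_alt
    have hA := pvGoA N M hN path 0 start [start] (by simp)
    have hB := pvGoB N M hN path [] start (by simpa using by omega)
    simp only [Nat.cast_zero, Int.zero_sub, Int.sub_zero] at hA
    have h0 : (-N).toNat = 0 := by omega
    rw [h0, List.drop_zero] at hA
    have hcond : ¬ ((0:Int) = N + 1) := by omega
    simp only [List.length_nil, Nat.cast_zero, List.map_nil, List.sum_nil,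
      Int.sub_zero, hcond, if_false, List.drop_zero, pvEnd, pvChain, pvCumul,
      Int.add_zero, Prod.mk.eta] at hB
    rw [hA, hB]
  · have hpath : path = [] := hPre.resolve_left hN
    subst hpath
    rfl
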